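-- pv_equiv track=rewrite | github.com/soulchicken/cruch-programmers-cote | Python/Level_2/47_무인도 여행.py | solution
-- ===== SOURCE A (Python) =====
-- def solution(maps):
--     from collections import deque
--     answer = []
--     I = len(maps)
--     J = len(maps[0])
--     li = [[0 for _ in range(J)] for _ in range(I)]
--
--     def check(i, j):
--         return 0 <= i < I and 0 <= j < J
--     move = ((1, 0), (-1, 0), (0, 1), (0, -1))
--
--     for i in range(I):
--         for j in range(J):
--             if maps[i][j] == 'X':
--                 li[i][j] = 1
--
--     for i in range(I):
--         for j in range(J):
--             if li[i][j]:
--                 continue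
--
--             count = 0
--             que = deque()
--             que.append((i, j))
--
--             while que:
--                 a, b = que.pop()
--                 if not check(a, b):
--                     continue
--                 if li[a][b]:
--                     continue
--                 count += int(maps[a][b])
--                 li[a][b] = 1
--
--                 for x, y in move:
--                     que.append((x+a, y+b))
--             answer.append(count)
--
--     if answer:
--         return sorted(answer)
--     return [-1]
-- ===== SOURCE B (Python) =====
-- def solution(maps):
--     I = len(maps)
--     J = len(maps[0])
--     li = [[1 if maps[i][j] == 'X' else 0 for j in range(J)] for i in range(I)]
--
--     def visit(i, j):
--         if i < 0 or i >= I or j < 0 or j >= J or li[i][j]: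
--             return 0
--         li[i][j] = 1
--         s = int(maps[i][j])
--         for di, dj in ((0, -1), (0, 1), (-1, 0), (1, 0)):
--             s += visit(i + di, j + dj)
--         return s
--
--     cells = [(i, j) for i in range(I) for j in range(J)]
--     sums = []
--     for i, j in cells:
--         if not li[i][j]:
--             sums.append(visit(i, j))
--     return sorted(sums) if sums else [-1]
-- ===== Notes on version B (the rewrite author's own statement) =====
-- stated objective: simpler
-- what changed: Replaces the explicit deque-as-stack worklist loop (push four neighbours, pop, re-check, accumulate into a mutable counter) with a direct recursive flood fill that returns each component's sum, builds the marker grid by one comprehension instead of a zero grid plus a marking pass, and scans a flat precomputed cell list instead of nested index loops.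
import Mathlib
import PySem

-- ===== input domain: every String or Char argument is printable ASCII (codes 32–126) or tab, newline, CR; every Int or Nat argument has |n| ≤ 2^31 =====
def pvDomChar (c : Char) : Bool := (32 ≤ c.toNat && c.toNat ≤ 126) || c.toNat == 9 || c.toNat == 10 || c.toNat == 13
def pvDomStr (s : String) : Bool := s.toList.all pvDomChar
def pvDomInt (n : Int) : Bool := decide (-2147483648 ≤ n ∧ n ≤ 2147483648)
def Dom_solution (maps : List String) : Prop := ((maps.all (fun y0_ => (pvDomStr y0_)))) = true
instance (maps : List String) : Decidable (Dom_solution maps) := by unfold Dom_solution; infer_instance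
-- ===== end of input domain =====

-- B replaces A's explicit deque-as-stack worklist loop by a recursive flood fill returning each
-- component's sum, builds the marker grid by one comprehension instead of a zero grid plus a marking
-- pass, and scans a flat cell list instead of nested index loops (objective: simpler; same cost).
-- A mutates nothing observable by the caller; both Pythons raise on the same inputs (outside Pre_).

-- ===== PORT A =====
-- shared cell accessors: both Pythons read maps[a][b] and read/write the marker grid li[a][b]
-- the same way, so both ports use these helpers.
def cellChar (maps : List String) (a b : Int) : Option Char :=
  PySem.Str.pyGet? ((PySem.List.pyGet? maps a).getD "") b

def cellX (maps : List String) (a b : Int) : Bool :=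
  cellChar maps a b == some 'X'

-- int(maps[a][b]); ValueError (none) only outside Pre_solution, where the default is never compared
def cellInt (maps : List String) (a b : Int) : Int :=
  ((cellChar maps a b).bind (fun c => PySem.Int.ofChars? [c])).getD 0

-- li[a][b]; all reads/writes are behind the 0 ≤ a < I, 0 ≤ b < J check, where toNat is exact
def getCell (li : List (List Int)) (a b : Int) : Int :=
  (li.getD a.toNat []).getD b.toNat 0

def setCell (li : List (List Int)) (a b : Int) : List (List Int) :=
  li.set a.toNat ((li.getD a.toNat []).set b.toNat 1)

-- check(a,b): 0 ≤ a < I and 0 ≤ b < J.  li is an I×J grid at every call (built with I rows of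
-- length J; setCell preserves the shape), so the bounds are read off li itself — extensionally
-- the same test, and it doubles as the termination measure's domain.
def inb (li : List (List Int)) (a b : Int) : Bool :=
  decide (0 ≤ a) && decide (a < (li.length : Int)) &&
    decide (0 ≤ b) && decide (b < (((li.getD a.toNat []).length : Int)))

-- number of cells still holding 0: the termination measure of the flood fill
def unmarked (li : List (List Int)) : Nat :=
  (li.map (fun r => r.countP (fun v => v == 0))).sum

-- termination lemmas for the ports (cited in decreasing_by)
lemma countP_set_one_lt (r : List Int) (b : Nat) (hb : b < r.length) (h0 : r.getD b 0 = 0) :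
    ((r.set b 1).countP (fun v => v == 0)) < r.countP (fun v => v == 0) := by
  induction r generalizing b with
  | nil => simp at hb
  | cons h t ih =>
    cases b with
    | zero =>
      simp only [List.getD_cons_zero] at h0
      simp [h0]
    | succ b =>
      simp only [List.length_cons, Nat.succ_lt_succ_iff] at hb
      simp only [List.getD_cons_succ] at h0
      simp only [List.set_cons_succ, List.countP_cons]
      have := ih b hb h0; omega

lemma unmarked_set_lt (li : List (List Int)) (a : Nat) (ha : a < li.length) (r : List Int)
    (hr : r.countP (fun v => v == 0) < (li.getD a []).countP (fun v => v == 0)) :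
    unmarked (li.set a r) < unmarked li := by
  induction li generalizing a with
  | nil => simp at ha
  | cons h t ih =>
    cases a with
    | zero =>
      simp only [List.getD_cons_zero] at hr
      simp only [List.set_cons_zero, unmarked, List.map_cons, List.sum_cons]
      omega
    | succ a =>
      simp only [List.length_cons, Nat.succ_lt_succ_iff] at ha
      simp only [List.getD_cons_succ] at hr
      simp only [List.set_cons_succ, unmarked, List.map_cons, List.sum_cons]
      have := ih a ha hr
      simp only [unmarked] at this
      omega

lemma unmarked_setCell_lt (li : List (List Int)) (a b : Int)
    (h : inb li a b = true) (h0 : getCell li a b = 0) :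
    unmarked (setCell li a b) < unmarked li := by
  simp only [inb, Bool.and_eq_true, decide_eq_true_eq] at h
  obtain ⟨⟨⟨ha0, haI⟩, hb0⟩, hbJ⟩ := h
  have ha : a.toNat < li.length := by omega
  have hb : b.toNat < (li.getD a.toNat []).length := by omega
  exact unmarked_set_lt li a.toNat ha _ (countP_set_one_lt _ b.toNat hb h0)

-- the DFS worklist loop: que is the deque used as a stack (head = top; deque.append pushes on the
-- head here, deque.pop takes the head), cnt the running count, li the marker grid
def loopA (maps : List String) (que : List (Int × Int)) (cnt : Int) (li : List (List Int)) :
    Int × List (List Int) :=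
  match que with
  | [] => (cnt, li)
  | (a, b) :: q =>
    if inb li a b = false then loopA maps q cnt li
    else if getCell li a b ≠ 0 then loopA maps q cnt li
    else loopA maps ((a, b - 1) :: (a, b + 1) :: (a - 1, b) :: (a + 1, b) :: q)
        (cnt + cellInt maps a b) (setCell li a b)
termination_by (unmarked li, que.length)
decreasing_by
  · exact Prod.Lex.right _ (by simp)
  · exact Prod.Lex.right _ (by simp)
  · exact Prod.Lex.left _ _ (unmarked_setCell_lt li a b (by revert ‹¬inb li a b = false›; cases inb li a b <;> simp) (by omega))

def solution (maps : List String) : List Int :=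
  let I : Int := maps.length
  let J : Int := PySem.Str.len ((PySem.List.pyGet? maps 0).getD "")  -- maps[0]: IndexError on [] (outside Pre_)
  -- li = [[0]*J for _ in range(I)]
  let li0 := (PySem.List.pyRange 0 I 1).map (fun _ => (PySem.List.pyRange 0 J 1).map (fun _ => (0 : Int)))
  -- marking pass: li[i][j] = 1 where maps[i][j] == 'X'
  let li1 := (PySem.List.pyRange 0 I 1).foldl (fun li i =>
    (PySem.List.pyRange 0 J 1).foldl (fun li j =>
      if cellX maps i j then setCell li i j else li) li) li0
  -- main pass: flood fill from every unmarked cell, collecting counts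
  let r := (PySem.List.pyRange 0 I 1).foldl (fun (st : List Int × List (List Int)) i =>
    (PySem.List.pyRange 0 J 1).foldl (fun (st : List Int × List (List Int)) j =>
      if getCell st.2 i j ≠ 0 then st
      else
        let p := loopA maps [(i, j)] 0 st.2
        (st.1 ++ [p.1], p.2)) st) ([], li1)
  if r.1 = [] then [-1] else PySem.List.sorted r.1 (fun x => x) false

-- ===== PORT B =====
-- recursive flood fill; the Nat fuel only makes the recursion structural (it is spent once per
-- newly marked cell, so `unmarked li` is always enough — never exhausted on any actual call)
def visitF (maps : List String) : Nat → Int × Int → List (List Int) → Int × List (List Int)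
  | 0, _, li => (0, li)
  | n + 1, (i, j), li =>
    if inb li i j = false ∨ getCell li i j ≠ 0 then (0, li)
    else
      let li0 := setCell li i j
      let s0 := cellInt maps i j
      let r1 := visitF maps n (i, j - 1) li0
      let r2 := visitF maps n (i, j + 1) r1.2
      let r3 := visitF maps n (i - 1, j) r2.2
      let r4 := visitF maps n (i + 1, j) r3.2
      (s0 + r1.1 + r2.1 + r3.1 + r4.1, r4.2)

def visit (maps : List String) (p : Int × Int) (li : List (List Int)) : Int × List (List Int) :=
  visitF maps (unmarked li) p li

def solution_alt (maps : List String) : List Int :=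
  let I : Int := maps.length
  let J : Int := PySem.Str.len ((PySem.List.pyGet? maps 0).getD "")  -- maps[0]: IndexError on [] (outside Pre_)
  -- li = [[1 if maps[i][j]=='X' else 0 for j in range(J)] for i in range(I)]
  let li := (PySem.List.pyRange 0 I 1).map (fun i =>
    (PySem.List.pyRange 0 J 1).map (fun j => if cellX maps i j then (1 : Int) else 0))
  let cells := (PySem.List.pyRange 0 I 1).flatMap (fun i =>
    (PySem.List.pyRange 0 J 1).map (fun j => (i, j)))
  let r := cells.foldl (fun (st : List Int × List (List Int)) p =>
    if getCell st.2 p.1 p.2 ≠ 0 then st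
    else
      let v := visit maps p st.2
      (st.1 ++ [v.1], v.2)) ([], li)
  if r.1 = [] then [-1] else PySem.List.sorted r.1 (fun x => x) false

-- ===== PRECONDITION & SPEC =====
-- Pre_: exactly the inputs where the Python returns: maps is nonempty (else maps[0] raises
-- IndexError), every row reaches the width J of the first row (else maps[i][j] raises IndexError),
-- and every cell in those first J columns is 'X' or a decimal digit (else int(...) raises ValueError).
def Pre_solution (maps : List String) : Prop :=
  maps ≠ [] ∧
  (maps.all (fun s =>
    decide ((maps.headD "").toList.length ≤ s.toList.length) &&
    (s.toList.take (maps.headD "").toList.length).all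
      (fun c => c == 'X' || (decide ('0' ≤ c) && decide (c ≤ '9'))))) = true
instance (maps : List String) : Decidable (Pre_solution maps) := by
  unfold Pre_solution; infer_instance

def pvWitness_solution : List String := ["X9X", "314", "2XX"]

def Spec_solution (maps : List String) (out : List Int) : Prop := out = solution_alt maps
instance (maps : List String) (out : List Int) : Decidable (Spec_solution maps out) := by
  unfold Spec_solution; infer_instance

-- ===== CLAIM (what is proved, stated in full; the proofs are below) =====
def Claim_equal_solution : Prop :=
  ∀ (maps : List String), Dom_solution maps → Pre_solution maps → Spec_solution maps (solution maps)

-- ===== LEMMAS AND PROOFS =====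

lemma countP_set_one_le (r : List Int) (b : Nat) :
    ((r.set b 1).countP (fun v => v == 0)) ≤ r.countP (fun v => v == 0) := by
  induction r generalizing b with
  | nil => simp
  | cons h t ih =>
    cases b with
    | zero => simp [List.countP_cons]
    | succ b => simp only [List.set_cons_succ, List.countP_cons]; have := ih b; omega

lemma unmarked_set_le (li : List (List Int)) (a : Nat) (r : List Int)
    (hr : r.countP (fun v => v == 0) ≤ (li.getD a []).countP (fun v => v == 0)) :
    unmarked (li.set a r) ≤ unmarked li := by
  induction li generalizing a with
  | nil => simp
  | cons h t ih =>
    cases a with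
    | zero =>
      simp only [List.getD_cons_zero] at hr
      simp [unmarked, hr]
    | succ a =>
      simp only [List.getD_cons_succ] at hr
      simp only [List.set_cons_succ, unmarked, List.map_cons, List.sum_cons]
      have := ih a hr
      simp only [unmarked] at this
      omega

lemma unmarked_setCell_le (li : List (List Int)) (a b : Int) :
    unmarked (setCell li a b) ≤ unmarked li := by
  exact unmarked_set_le li a.toNat _ (countP_set_one_le _ b.toNat)


-- unfolding equations for loopA (well-founded recursion)
lemma loopA_nil (maps : List String) (c : Int) (li : List (List Int)) :
    loopA maps [] c li = (c, li) := by rw [loopA]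

lemma loopA_bad1 (maps : List String) (a b : Int) (q : List (Int × Int)) (c : Int)
    (li : List (List Int)) (h : inb li a b = false) :
    loopA maps ((a, b) :: q) c li = loopA maps q c li := by
  rw [loopA]; simp [h]

lemma loopA_bad2 (maps : List String) (a b : Int) (q : List (Int × Int)) (c : Int)
    (li : List (List Int)) (h1 : inb li a b = true) (h2 : getCell li a b ≠ 0) :
    loopA maps ((a, b) :: q) c li = loopA maps q c li := by
  rw [loopA]; simp [h1, h2]

lemma loopA_good (maps : List String) (a b : Int) (q : List (Int × Int)) (c : Int)
    (li : List (List Int)) (h1 : inb li a b = true) (h2 : getCell li a b = 0) :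
    loopA maps ((a, b) :: q) c li
      = loopA maps ((a, b - 1) :: (a, b + 1) :: (a - 1, b) :: (a + 1, b) :: q)
          (c + cellInt maps a b) (setCell li a b) := by
  rw [loopA]; simp [h1, h2]

-- unfolding equations for visitF
lemma visitF_zero (maps : List String) (p : Int × Int) (li : List (List Int)) :
    visitF maps 0 p li = (0, li) := rfl

lemma visitF_bad (maps : List String) (n : Nat) (i j : Int) (li : List (List Int))
    (h : inb li i j = false ∨ getCell li i j ≠ 0) :
    visitF maps (n + 1) (i, j) li = (0, li) := by
  rw [visitF]; rw [if_pos h]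

lemma visitF_good (maps : List String) (n : Nat) (i j : Int) (li : List (List Int))
    (h1 : inb li i j = true) (h2 : getCell li i j = 0) :
    visitF maps (n + 1) (i, j) li
      = (cellInt maps i j
            + (visitF maps n (i, j - 1) (setCell li i j)).1
            + (visitF maps n (i, j + 1) (visitF maps n (i, j - 1) (setCell li i j)).2).1
            + (visitF maps n (i - 1, j)
                (visitF maps n (i, j + 1) (visitF maps n (i, j - 1) (setCell li i j)).2).2).1
            + (visitF maps n (i + 1, j) (visitF maps n (i - 1, j)
                (visitF maps n (i, j + 1) (visitF maps n (i, j - 1) (setCell li i j)).2).2).2).1,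
          (visitF maps n (i + 1, j) (visitF maps n (i - 1, j)
                (visitF maps n (i, j + 1) (visitF maps n (i, j - 1) (setCell li i j)).2).2).2).2) := by
  rw [visitF]
  rw [if_neg (by simp [h1, h2])]

-- visitF never unmarks a cell
lemma visitF_mono (maps : List String) :
    ∀ (n : Nat) (p : Int × Int) (li : List (List Int)),
      unmarked (visitF maps n p li).2 ≤ unmarked li := by
  intro n
  induction n with
  | zero => intro p li; simp [visitF_zero]
  | succ n ih =>
    intro p li
    obtain ⟨i, j⟩ := p
    by_cases h : inb li i j = false ∨ getCell li i j ≠ 0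
    · simp [visitF_bad maps n i j li h]
    · rw [not_or, not_not] at h
      obtain ⟨h1, h2⟩ := h
      have h1' : inb li i j = true := by revert h1; cases inb li i j <;> simp
      have hs : (visitF maps (n + 1) (i, j) li).2
          = (visitF maps n (i + 1, j) (visitF maps n (i - 1, j)
              (visitF maps n (i, j + 1) (visitF maps n (i, j - 1) (setCell li i j)).2).2).2).2 := by
        rw [visitF_good maps n i j li h1' h2]
      rw [hs]
      have m0 := unmarked_setCell_le li i j
      have m1 := ih (i, j - 1) (setCell li i j)
      have m2 := ih (i, j + 1) (visitF maps n (i, j - 1) (setCell li i j)).2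
      have m3 := ih (i - 1, j) (visitF maps n (i, j + 1) (visitF maps n (i, j - 1) (setCell li i j)).2).2
      have m4 := ih (i + 1, j) (visitF maps n (i - 1, j) (visitF maps n (i, j + 1) (visitF maps n (i, j - 1) (setCell li i j)).2).2).2
      omega

-- the worklist loop processes the queue left to right
lemma loopA_append (maps : List String) :
    ∀ (n : Nat) (li : List (List Int)), unmarked li ≤ n →
      ∀ (q1 q2 : List (Int × Int)) (c : Int),
        loopA maps (q1 ++ q2) c li
          = loopA maps q2 (loopA maps q1 c li).1 (loopA maps q1 c li).2 := by
  intro n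
  induction n using Nat.strong_induction_on with
  | _ n IH =>
    intro li hn q1 q2 c
    induction q1 generalizing c with
    | nil => simp [loopA_nil]
    | cons x q1 ihq =>
      obtain ⟨a, b⟩ := x
      by_cases h1 : inb li a b = false
      · rw [List.cons_append, loopA_bad1 maps a b _ c li h1, loopA_bad1 maps a b _ c li h1]
        exact ihq c
      · have h1' : inb li a b = true := by revert h1; cases inb li a b <;> simp
        by_cases h2 : getCell li a b = 0
        · rw [List.cons_append, loopA_good maps a b _ c li h1' h2,
              loopA_good maps a b _ c li h1' h2]
          have hlt : unmarked (setCell li a b) < unmarked li := unmarked_setCell_lt li a b h1' h2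
          have := IH (unmarked (setCell li a b)) (by omega) (setCell li a b) (le_refl _)
            ((a, b - 1) :: (a, b + 1) :: (a - 1, b) :: (a + 1, b) :: q1) q2 (c + cellInt maps a b)
          simpa using this
        · rw [List.cons_append, loopA_bad2 maps a b _ c li h1' h2,
              loopA_bad2 maps a b _ c li h1' h2]
          exact ihq c

-- the running count is a pure accumulator
lemma loopA_shift (maps : List String) :
    ∀ (n : Nat) (li : List (List Int)), unmarked li ≤ n →
      ∀ (q : List (Int × Int)) (c : Int),
        loopA maps q c li = (c + (loopA maps q 0 li).1, (loopA maps q 0 li).2) := by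
  intro n
  induction n using Nat.strong_induction_on with
  | _ n IH =>
    intro li hn q
    induction q with
    | nil => intro c; simp [loopA_nil]
    | cons x q ihq =>
      intro c
      obtain ⟨a, b⟩ := x
      by_cases h1 : inb li a b = false
      · rw [loopA_bad1 maps a b q c li h1, loopA_bad1 maps a b q 0 li h1]
        exact ihq c
      · have h1' : inb li a b = true := by revert h1; cases inb li a b <;> simp
        by_cases h2 : getCell li a b = 0
        · rw [loopA_good maps a b q c li h1' h2, loopA_good maps a b q 0 li h1' h2]
          have hlt : unmarked (setCell li a b) < unmarked li := unmarked_setCell_lt li a b h1' h2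
          have hc := IH (unmarked (setCell li a b)) (by omega) (setCell li a b) (le_refl _)
            ((a, b - 1) :: (a, b + 1) :: (a - 1, b) :: (a + 1, b) :: q) (c + cellInt maps a b)
          have h0 := IH (unmarked (setCell li a b)) (by omega) (setCell li a b) (le_refl _)
            ((a, b - 1) :: (a, b + 1) :: (a - 1, b) :: (a + 1, b) :: q) (0 + cellInt maps a b)
          rw [hc, h0]
          simp only [Prod.mk.injEq]
          refine ⟨by simp; omega, by simp⟩
        · rw [loopA_bad2 maps a b q c li h1' h2, loopA_bad2 maps a b q 0 li h1' h2]
          exact ihq c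

-- a singleton worklist run IS the recursive flood fill (any sufficient fuel)
lemma loopA_single (maps : List String) :
    ∀ (n : Nat) (li : List (List Int)), unmarked li ≤ n →
      ∀ (p : Int × Int), loopA maps [p] 0 li = visitF maps n p li := by
  intro n
  induction n with
  | zero =>
    intro li hn p
    obtain ⟨i, j⟩ := p
    by_cases h1 : inb li i j = false
    · rw [loopA_bad1 maps i j [] 0 li h1, loopA_nil, visitF_zero]
    · have h1' : inb li i j = true := by revert h1; cases inb li i j <;> simp
      by_cases h2 : getCell li i j = 0
      · exact absurd (unmarked_setCell_lt li i j h1' h2) (by omega)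
      · rw [loopA_bad2 maps i j [] 0 li h1' h2, loopA_nil, visitF_zero]
  | succ n ih =>
    intro li hn p
    obtain ⟨i, j⟩ := p
    by_cases h1 : inb li i j = false
    · rw [loopA_bad1 maps i j [] 0 li h1, loopA_nil, visitF_bad maps n i j li (Or.inl h1)]
    · have h1' : inb li i j = true := by revert h1; cases inb li i j <;> simp
      by_cases h2 : getCell li i j = 0
      · rw [loopA_good maps i j [] 0 li h1' h2, visitF_good maps n i j li h1' h2]
        have hlt : unmarked (setCell li i j) < unmarked li := unmarked_setCell_lt li i j h1' h2
        have hn0 : unmarked (setCell li i j) ≤ n := by omega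
        -- abbreviations for the four recursive results
        set li0 := setCell li i j with hli0
        set r1 := visitF maps n (i, j - 1) li0 with hr1
        set r2 := visitF maps n (i, j + 1) r1.2 with hr2
        set r3 := visitF maps n (i - 1, j) r2.2 with hr3
        set r4 := visitF maps n (i + 1, j) r3.2 with hr4
        have u1 : unmarked r1.2 ≤ n := le_trans (visitF_mono maps n _ li0) hn0
        have u2 : unmarked r2.2 ≤ n := le_trans (visitF_mono maps n _ r1.2) u1
        have u3 : unmarked r3.2 ≤ n := le_trans (visitF_mono maps n _ r2.2) u2
        -- peel the four pushed cells off the queue one by one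
        have e1 : loopA maps [(i, j - 1)] (0 + cellInt maps i j) li0
            = (0 + cellInt maps i j + r1.1, r1.2) := by
          rw [loopA_shift maps n li0 hn0, ih li0 hn0 (i, j - 1), ← hr1]
        have e2 : loopA maps [(i, j + 1)] (0 + cellInt maps i j + r1.1) r1.2
            = (0 + cellInt maps i j + r1.1 + r2.1, r2.2) := by
          rw [loopA_shift maps n r1.2 u1, ih r1.2 u1 (i, j + 1), ← hr2]
        have e3 : loopA maps [(i - 1, j)] (0 + cellInt maps i j + r1.1 + r2.1) r2.2
            = (0 + cellInt maps i j + r1.1 + r2.1 + r3.1, r3.2) := by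
          rw [loopA_shift maps n r2.2 u2, ih r2.2 u2 (i - 1, j), ← hr3]
        have e4 : loopA maps [(i + 1, j)] (0 + cellInt maps i j + r1.1 + r2.1 + r3.1) r3.2
            = (0 + cellInt maps i j + r1.1 + r2.1 + r3.1 + r4.1, r4.2) := by
          rw [loopA_shift maps n r3.2 u3, ih r3.2 u3 (i + 1, j), ← hr4]
        have split1 := loopA_append maps (unmarked li0) li0 (le_refl _)
          [(i, j - 1)] [(i, j + 1), (i - 1, j), (i + 1, j)] (0 + cellInt maps i j)
        have split2 := loopA_append maps (unmarked r1.2) r1.2 (le_refl _)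
          [(i, j + 1)] [(i - 1, j), (i + 1, j)] (0 + cellInt maps i j + r1.1)
        have split3 := loopA_append maps (unmarked r2.2) r2.2 (le_refl _)
          [(i - 1, j)] [(i + 1, j)] (0 + cellInt maps i j + r1.1 + r2.1)
        have goal1 : loopA maps [(i, j - 1), (i, j + 1), (i - 1, j), (i + 1, j)]
            (0 + cellInt maps i j) li0 = (0 + cellInt maps i j + r1.1 + r2.1 + r3.1 + r4.1, r4.2) := by
          have s1 : ([(i, j - 1)] ++ [(i, j + 1), (i - 1, j), (i + 1, j)] :
              List (Int × Int)) = [(i, j - 1), (i, j + 1), (i - 1, j), (i + 1, j)] := rfl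
          rw [← s1, split1, e1]
          have s2 : ([(i, j + 1)] ++ [(i - 1, j), (i + 1, j)] :
              List (Int × Int)) = [(i, j + 1), (i - 1, j), (i + 1, j)] := rfl
          rw [← s2, split2, e2]
          have s3 : ([(i - 1, j)] ++ [(i + 1, j)] :
              List (Int × Int)) = [(i - 1, j), (i + 1, j)] := rfl
          rw [← s3, split3, e3, e4]
        rw [goal1]
        simp only [Prod.mk.injEq]
        exact ⟨by omega, by trivial⟩
      · rw [loopA_bad2 maps i j [] 0 li h1' h2, loopA_nil,
            visitF_bad maps n i j li (Or.inr h2)]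

-- visit (B's recursive flood fill, at its stated fuel) is A's singleton worklist run
lemma visit_loopA (maps : List String) (p : Int × Int) (li : List (List Int)) :
    visit maps p li = loopA maps [p] 0 li := by
  rw [visit, loopA_single maps (unmarked li) li (le_refl _) p]

-- ===== the two grid initialisations agree =====

lemma rowfold_length (t : Int → Bool) (L : List Int) :
    ∀ r : List Int, (L.foldl (fun r j => if t j then r.set j.toNat 1 else r) r).length
      = r.length := by
  induction L with
  | nil => intro r; rfl
  | cons j L ih =>
    intro r
    by_cases hj : t j <;> simp [hj, ih, List.length_set]

-- one row's marking pass only touches row i of the grid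
lemma markrow (t : Int → Bool) (i : Int) (L : List Int) :
    ∀ li : List (List Int),
      L.foldl (fun li j => if t j then setCell li i j else li) li
        = li.set i.toNat
            (L.foldl (fun r j => if t j then r.set j.toNat 1 else r) (li.getD i.toNat [])) := by
  induction L with
  | nil =>
    intro li
    rw [List.foldl_nil, List.foldl_nil]
    by_cases hi : i.toNat < li.length
    · rw [List.getD_eq_getElem li [] hi, List.set_getElem_self]
    · rw [List.set_eq_of_length_le (by omega)]
  | cons j L ih =>
    intro li
    by_cases hj : t j
    · simp only [List.foldl_cons, if_pos hj]
      rw [ih (setCell li i j),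
        show setCell li i j = li.set i.toNat ((li.getD i.toNat []).set j.toNat 1) from rfl,
        List.set_set]
      by_cases hi : i.toNat < li.length
      · have : (li.set i.toNat ((li.getD i.toNat []).set j.toNat 1)).getD i.toNat []
            = (li.getD i.toNat []).set j.toNat 1 := by
          simp [List.getD, hi]
        rw [this]
      · have h1 : li.set i.toNat ((li.getD i.toNat []).set j.toNat 1) = li :=
          List.set_eq_of_length_le (by omega)
        have h2 : li.getD i.toNat ([] : List Int) = [] :=
          List.getD_eq_default _ _ (by omega)
        rw [h1, h2, List.set_nil]
    · simp only [List.foldl_cons, if_neg hj]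
      exact ih li

-- the value of a marked row at each index
lemma rowfold_getD (t : Int → Bool) (L : List Int) :
    ∀ (r : List Int) (k : Nat), (∀ j ∈ L, 0 ≤ j ∧ j < (r.length : Int)) → k < r.length →
      (L.foldl (fun r j => if t j then r.set j.toNat 1 else r) r).getD k 0
        = if ((k : Int) ∈ L ∧ t (k : Int)) then 1 else r.getD k 0 := by
  induction L with
  | nil => intro r k _ _; simp
  | cons j L ih =>
    intro r k hL hk
    obtain ⟨hj0, hjr⟩ := hL j List.mem_cons_self
    simp only [List.foldl_cons]
    by_cases ht : t j
    · rw [if_pos ht]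
      have hlen : (r.set j.toNat 1).length = r.length := List.length_set ..
      rw [ih (r.set j.toNat 1) k
        (fun x hx => by rw [hlen]; exact hL x (List.mem_cons_of_mem _ hx))
        (by omega)]
      by_cases hjk : j.toNat = k
      · have hje : j = (k : Int) := by omega
        have hset : (r.set j.toNat 1).getD k 0 = 1 := by
          subst hjk; simp [List.getD, hk]
        rw [hset, hje]
        simp [ht, ← hje]
      · have hset : (r.set j.toNat 1).getD k 0 = r.getD k 0 := by
          simp [List.getD, hjk]
        have hne : (k : Int) ≠ j := fun he => hjk (by omega)
        rw [hset]
        simp [List.mem_cons, hne]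
    · rw [if_neg ht]
      rw [ih r k (fun x hx => hL x (List.mem_cons_of_mem _ hx)) hk]
      by_cases hm : (k : Int) = j
      · rw [← hm] at ht; simp [ht]
      · simp [List.mem_cons, hm]

-- the whole marking pass, row by row
lemma gridfold_getD (f : Int → Int → Bool) (L2 : List Int) :
    ∀ (L : List Int) (li : List (List Int)) (k : Nat), L.Nodup → (∀ i ∈ L, 0 ≤ i) →
      k < li.length →
      (L.foldl (fun li i => L2.foldl (fun li j => if f i j then setCell li i j else li) li)
          li).getD k []
        = if ((k : Int) ∈ L) then
            L2.foldl (fun r j => if f (k : Int) j then r.set j.toNat 1 else r) (li.getD k [])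
          else li.getD k [] := by
  intro L
  induction L with
  | nil => intro li k _ _ _; simp
  | cons i L ih =>
    intro li k hnd h0 hk
    have hi0 : 0 ≤ i := h0 i List.mem_cons_self
    simp only [List.foldl_cons]
    rw [markrow (f i) i L2 li]
    have hlen : (li.set i.toNat
        (L2.foldl (fun r j => if f i j then r.set j.toNat 1 else r)
          (li.getD i.toNat []))).length = li.length := List.length_set ..
    rw [ih _ k (List.nodup_cons.mp hnd).2 (fun x hx => h0 x (List.mem_cons_of_mem _ hx))
      (by omega)]
    by_cases hki : (k : Int) = i
    · subst hki
      have hknot : ((k : Int)) ∉ L := (List.nodup_cons.mp hnd).1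
      simp only [Int.toNat_natCast]
      rw [if_neg hknot, if_pos (List.mem_cons_self)]
      simp [List.getD, hk]
    · have hkn : i.toNat ≠ k := fun he => hki (by omega)
      have hset : (li.set i.toNat
          (L2.foldl (fun r j => if f i j then r.set j.toNat 1 else r)
            (li.getD i.toNat []))).getD k []
          = li.getD k [] := by
        simp [List.getD, hkn]
      rw [hset]
      simp [List.mem_cons, hki]

lemma gridfold_length (f : Int → Int → Bool) (L2 : List Int) (L : List Int) :
    ∀ li : List (List Int),
      (L.foldl (fun li i => L2.foldl (fun li j => if f i j then setCell li i j else li) li)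
        li).length = li.length := by
  induction L with
  | nil => intro li; rfl
  | cons i L ih =>
    intro li
    simp only [List.foldl_cons]
    rw [markrow (f i) i L2 li, ih, List.length_set]

-- marking an all-zero row of width J is the comprehension row
lemma row_init (t : Int → Bool) (J : Int) :
    (PySem.List.pyRange 0 J 1).foldl (fun r j => if t j then r.set j.toNat 1 else r)
        ((PySem.List.pyRange 0 J 1).map (fun _ => (0 : Int)))
      = (PySem.List.pyRange 0 J 1).map (fun j => if t j then (1 : Int) else 0) := by
  have hJlen : (PySem.List.pyRange 0 J 1).length = (J - 0).toNat := PySem.List.length_pyRange_one 0 J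
  have hr0len : ((PySem.List.pyRange 0 J 1).map (fun _ => (0 : Int))).length = (J - 0).toNat := by
    rw [List.length_map, hJlen]
  apply List.ext_getElem
  · rw [rowfold_length, hr0len, List.length_map, hJlen]
  · intro m hm1 hm2
    have hmJ : m < (J - 0).toNat := by
      rw [rowfold_length, hr0len] at hm1; exact hm1
    have hmem : ((m : Int)) ∈ PySem.List.pyRange 0 J 1 := by
      rw [PySem.List.mem_pyRange_one]; omega
    have hgd := rowfold_getD t (PySem.List.pyRange 0 J 1)
      ((PySem.List.pyRange 0 J 1).map (fun _ => (0 : Int))) m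
      (fun j hj => by
        rw [PySem.List.mem_pyRange_one] at hj
        constructor
        · exact hj.1
        · rw [hr0len]; omega)
      (by omega)
    rw [← List.getD_eq_getElem _ 0 hm1, hgd]
    have hz : ((PySem.List.pyRange 0 J 1).map (fun _ => (0 : Int))).getD m 0 = 0 := by
      rw [List.getD_eq_getElem _ 0 (by omega), List.getElem_map]
    rw [hz]
    have hrhs : ((PySem.List.pyRange 0 J 1).map (fun j => if t j then (1 : Int) else 0))[m]
        = if t ((m : Int)) then (1 : Int) else 0 := by
      rw [List.getElem_map]
      congr 1
      have := PySem.List.getElem_pyRange_one (a := 0) (b := J) (k := m) (h := by omega)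
      rw [this]; norm_num
    rw [hrhs]
    simp [hmem]

-- A's zero grid plus marking pass equals B's comprehension grid
lemma init_eq (maps : List String) (I J : Int) :
    (PySem.List.pyRange 0 I 1).foldl (fun li i =>
        (PySem.List.pyRange 0 J 1).foldl (fun li j =>
          if cellX maps i j then setCell li i j else li) li)
      ((PySem.List.pyRange 0 I 1).map (fun _ =>
        (PySem.List.pyRange 0 J 1).map (fun _ => (0 : Int))))
    = (PySem.List.pyRange 0 I 1).map (fun i =>
        (PySem.List.pyRange 0 J 1).map (fun j => if cellX maps i j then (1 : Int) else 0)) := by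
  have hIlen : (PySem.List.pyRange 0 I 1).length = (I - 0).toNat := PySem.List.length_pyRange_one 0 I
  have hlilen : ((PySem.List.pyRange 0 I 1).map (fun _ =>
      (PySem.List.pyRange 0 J 1).map (fun _ => (0 : Int)))).length = (I - 0).toNat := by
    rw [List.length_map, hIlen]
  apply List.ext_getElem
  · rw [gridfold_length (fun i j => cellX maps i j), hlilen, List.length_map, hIlen]
  · intro k hk1 hk2
    have hkI : k < (I - 0).toNat := by
      rw [gridfold_length (fun i j => cellX maps i j), hlilen] at hk1; exact hk1
    have hmem : ((k : Int)) ∈ PySem.List.pyRange 0 I 1 := by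
      rw [PySem.List.mem_pyRange_one]; omega
    have hgd := gridfold_getD (fun i j => cellX maps i j) (PySem.List.pyRange 0 J 1)
      (PySem.List.pyRange 0 I 1)
      ((PySem.List.pyRange 0 I 1).map (fun _ =>
        (PySem.List.pyRange 0 J 1).map (fun _ => (0 : Int)))) k
      (PySem.List.nodup_pyRange_one 0 I)
      (fun i hi => (PySem.List.mem_pyRange_one.mp hi).1)
      (by omega)
    rw [← List.getD_eq_getElem _ [] hk1, hgd]
    have hz : ((PySem.List.pyRange 0 I 1).map (fun _ =>
        (PySem.List.pyRange 0 J 1).map (fun _ => (0 : Int)))).getD k []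
        = (PySem.List.pyRange 0 J 1).map (fun _ => (0 : Int)) := by
      rw [List.getD_eq_getElem _ [] (by omega), List.getElem_map]
    rw [hz]
    have hrhs : ((PySem.List.pyRange 0 I 1).map (fun i =>
        (PySem.List.pyRange 0 J 1).map (fun j => if cellX maps i j then (1 : Int) else 0)))[k]
        = (PySem.List.pyRange 0 J 1).map (fun j => if cellX maps ((k : Int)) j then (1 : Int) else 0) := by
      rw [List.getElem_map]
      have := PySem.List.getElem_pyRange_one (a := 0) (b := I) (k := k) (h := by omega)
      rw [this]
      norm_num
    rw [hrhs]
    simp only [hmem, if_pos]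
    exact row_init (fun j => cellX maps ((k : Int)) j) J

theorem solution_equal (maps : List String) : solution maps = solution_alt maps := by
  simp only [solution, solution_alt]
  rw [init_eq maps (maps.length : Int) (PySem.Str.len ((PySem.List.pyGet? maps 0).getD ""))]
  rw [List.foldl_flatMap]
  simp only [List.foldl_map, visit_loopA]

-- ===== VERDICT (by name: the statement is the Claim_ definition above) =====
theorem solution_spec : Claim_equal_solution := by
  intro maps _ _
  unfold Spec_solution
  exact solution_equal maps
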